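-- pv_equiv track=rewrite | github.com/fe-aryan/Python | punarjanam/test.py | find_matrices
-- ===== SOURCE A (Python) =====
-- def find_matrices(n: int) -> bool:
--   # Create two empty matrices A and B
--   A = [[0 for _ in range(n)] for _ in range(n)]
--   B = [[0 for _ in range(n)] for _ in range(n)]
--
--   # Fill in the values for matrix A
--   for i in range(n):
--     for j in range(n):
--       A[i][j] = (i + j) % n + 1
--
--   # Fill in the values for matrix B
--   for i in range(n):
--     for j in range(n):
--       B[i][j] = (i - j + n) % n + 1
--
--   # Create a set to store the pairs in matrix C
--   pairs = set()
--
--   # Combine the corresponding elements of A and B to form matrix C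
--   for i in range(n):
--     for j in range(n):
--       pairs.add((A[i][j], B[i][j]))
--
--   # Check if the set contains all pairs from {1, 2, ..., n} x {1, 2, ..., n}
--   return len(pairs) == n**2
-- ===== SOURCE B (Python) =====
-- def find_matrices(n: int) -> bool:
--     # (i,j) -> ((i+j) % n, (i-j) % n) is a bijection on [0,n)^2 iff 2 is
--     # invertible mod n, i.e. iff n is odd; n == 0 holds vacuously.
--     return n == 0 or (n > 0 and n % 2 == 1)
-- ===== Notes on version B (the rewrite author's own statement) =====
-- stated objective: faster
-- what changed: Replaces the O(n^2) construction of both matrices and the pair set by the closed-form parity test n == 0 or (n > 0 and n % 2 == 1), justified by the invertibility of 2 mod n.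
import Mathlib
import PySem

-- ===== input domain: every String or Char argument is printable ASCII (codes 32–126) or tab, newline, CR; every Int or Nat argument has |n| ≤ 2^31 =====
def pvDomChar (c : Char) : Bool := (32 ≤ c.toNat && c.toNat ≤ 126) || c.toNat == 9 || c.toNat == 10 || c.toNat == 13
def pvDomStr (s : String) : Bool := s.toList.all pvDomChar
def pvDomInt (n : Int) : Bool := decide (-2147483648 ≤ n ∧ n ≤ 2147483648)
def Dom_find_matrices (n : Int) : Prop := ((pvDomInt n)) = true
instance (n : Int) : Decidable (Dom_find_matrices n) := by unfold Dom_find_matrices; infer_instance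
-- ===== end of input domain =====

-- ===== PORT A =====
-- B is faster: it replaces A's O(n^2) matrix/set construction by a closed-form parity test.
def find_matrices (n : Int) : Bool :=
  -- A = [[0 for _ in range(n)] for _ in range(n)]; B likewise
  let A0 : List (List Int) :=
    (PySem.List.pyRange 0 n 1).map (fun _ => (PySem.List.pyRange 0 n 1).map (fun _ => (0 : Int)))
  let B0 : List (List Int) :=
    (PySem.List.pyRange 0 n 1).map (fun _ => (PySem.List.pyRange 0 n 1).map (fun _ => (0 : Int)))
  -- for i in range(n): for j in range(n): A[i][j] = (i + j) % n + 1
  let A1 : List (List Int) :=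
    (PySem.List.pyRange 0 n 1).foldl (fun M i =>
      (PySem.List.pyRange 0 n 1).foldl (fun M j =>
        PySem.List.pySetD M i
          (PySem.List.pySetD (PySem.List.pyGetD M i []) j (PySem.Int.mod (i + j) n + 1))) M) A0
  -- for i in range(n): for j in range(n): B[i][j] = (i - j + n) % n + 1
  let B1 : List (List Int) :=
    (PySem.List.pyRange 0 n 1).foldl (fun M i =>
      (PySem.List.pyRange 0 n 1).foldl (fun M j =>
        PySem.List.pySetD M i
          (PySem.List.pySetD (PySem.List.pyGetD M i []) j (PySem.Int.mod (i - j + n) n + 1))) M) B0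
  -- pairs = set(); for i,j: pairs.add((A[i][j], B[i][j]))
  -- Python's set is ported as a hash set: the code only ever adds elements and takes len,
  -- and on those two operations a hash set is exact (it holds exactly the distinct pairs).
  let pairs : Std.HashSet (Int × Int) :=
    (PySem.List.pyRange 0 n 1).foldl (fun s i =>
      (PySem.List.pyRange 0 n 1).foldl (fun s j =>
        s.insert
          (PySem.List.pyGetD (PySem.List.pyGetD A1 i []) j 0,
           PySem.List.pyGetD (PySem.List.pyGetD B1 i []) j 0)) s) ∅
  -- return len(pairs) == n**2
  ((pairs.size : Int)) == n ^ 2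

-- ===== PORT B =====
def find_matrices_alt (n : Int) : Bool :=
  n == 0 || (decide (n > 0) && PySem.Int.mod n 2 == 1)

-- ===== PRECONDITION & SPEC =====
def Spec_find_matrices (n : Int) (out : Bool) : Prop := out = find_matrices_alt n
instance (n : Int) (out : Bool) : Decidable (Spec_find_matrices n out) := by unfold Spec_find_matrices; infer_instance

-- ===== CLAIM (what is proved, stated in full; the proofs are below) =====
def Claim_equal_find_matrices : Prop := ∀ (n : Int), Dom_find_matrices n → Spec_find_matrices n (find_matrices n)

-- ===== LEMMAS AND PROOFS =====

-- the pair A's loops put into the set at position (i, j), for n = (m : Int), m > 0 (emod form)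
def pvP (m i j : Nat) : Int × Int :=
  (((i : Int) + j) % (m : Int) + 1, ((i : Int) - j + (m : Int)) % (m : Int) + 1)

-- the list of pairs A collects, in loop order
def pvL (m : Nat) : List (Int × Int) :=
  (List.range m).flatMap (fun i => (List.range m).map (fun j => pvP m i j))

-- repeatedly updating index i (reading it back each time) = one update with the folded value
theorem pv_repeat_set {α β : Type} (dflt : α) (i : Nat) (op : β → α → α) :
    ∀ (l : List β) (M : List α), i < M.length →
      l.foldl (fun M j => M.set i (op j (M.getD i dflt))) M
      = M.set i (l.foldl (fun row j => op j row) (M.getD i dflt)) := by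
  intro l
  induction l with
  | nil =>
    intro M h
    simp [List.getD, List.getElem?_eq_getElem h, List.set_getElem_self]
  | cons a l ih =>
    intro M h
    simp only [List.foldl_cons]
    rw [ih _ (by simpa using h)]
    rw [List.getD_eq_getElem _ _ h, List.getD_eq_getElem _ _ (by simpa using h)]
    simp [List.getElem_set_self, List.set_set]

-- filling every slot of a replicate, where each step only reads its own (still fresh) slot
theorem pv_fill_range {α : Type} (dflt z : α) (m : Nat) (step : List α → Nat → List α)
    (rowOp : Nat → α → α)
    (hstep : ∀ (M : List α) (i : Nat), i < M.length → step M i = M.set i (rowOp i (M.getD i dflt))) :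
    ∀ k, k ≤ m →
      (List.range k).foldl step (List.replicate m z)
      = (List.range k).map (fun i => rowOp i z) ++ List.replicate (m - k) z := by
  intro k
  induction k with
  | zero => simp
  | succ k ih =>
    intro h
    rw [List.range_succ, List.foldl_append, List.map_append, ih (by omega)]
    set P := (List.range k).map (fun i => rowOp i z) with hP
    have hPlen : P.length = k := by simp [hP]
    have hrep : List.replicate (m - k) z = z :: List.replicate (m - (k + 1)) z := by
      rw [← List.replicate_succ]; congr 1; omega
    rw [hrep]
    set A := P ++ z :: List.replicate (m - (k + 1)) z with hA
    have hAlen : A.length = m := by simp [hA, hPlen]; omega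
    have hget : A.getD k dflt = z := by
      rw [hA, ← hPlen]; simp [List.getD]
    have hset : A.set k (rowOp k z) = P ++ rowOp k z :: List.replicate (m - (k + 1)) z := by
      rw [hA, ← hPlen]; simp
    simp only [List.foldl_cons, List.foldl_nil, hstep A k (by omega), hget, hset, List.map_cons,
      List.map_nil, List.append_assoc, List.cons_append, List.nil_append]

-- A's matrix-filling double loop, characterized
theorem pv_matrix (m : Nat) (v : Int → Int → Int) :
    (PySem.List.pyRange 0 (m : Int) 1).foldl (fun M i =>
      (PySem.List.pyRange 0 (m : Int) 1).foldl (fun M j =>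
        PySem.List.pySetD M i
          (PySem.List.pySetD (PySem.List.pyGetD M i []) j (v i j))) M)
      ((PySem.List.pyRange 0 (m : Int) 1).map (fun _ =>
        (PySem.List.pyRange 0 (m : Int) 1).map (fun _ => (0 : Int))))
    = (List.range m).map (fun i : Nat => (List.range m).map (fun j : Nat => v (i : Int) (j : Int))) := by
  rw [PySem.List.pyRange_zero_natCast m]
  have hinit : (List.map (fun k : Nat => (k : Int)) (List.range m)).map
      (fun _ => (List.map (fun k : Nat => (k : Int)) (List.range m)).map (fun _ => (0 : Int)))
      = List.replicate m (List.replicate m (0 : Int)) := by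
    simp [Function.comp_def, List.map_const']
  rw [hinit]
  simp only [List.foldl_map, PySem.List.pySetD_natCast, PySem.List.pyGetD_natCast]
  rw [pv_fill_range [] (List.replicate m (0 : Int)) m _
        (fun i row => (List.range m).foldl (fun row j => row.set j (v (i : Int) (j : Int))) row)
        (fun M i hi => pv_repeat_set [] i (fun j row => row.set j (v (i : Int) (j : Int))) (List.range m) M hi)
        m le_rfl]
  simp only [Nat.sub_self, List.replicate_zero, List.append_nil]
  apply List.map_congr_left
  intro i _
  rw [pv_fill_range 0 (0 : Int) m _ (fun j _ => v (i : Int) (j : Int)) (fun M j hj => rfl) m le_rfl]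
  simp

-- A's set-building double loop, characterized
theorem pv_pairs (m : Nat) (F G : Nat → Nat → Int) :
    (PySem.List.pyRange 0 (m : Int) 1).foldl (fun s i =>
      (PySem.List.pyRange 0 (m : Int) 1).foldl (fun s j =>
        s.insert
          (PySem.List.pyGetD (PySem.List.pyGetD
             ((List.range m).map (fun i : Nat => (List.range m).map (fun j : Nat => F i j))) i []) j 0,
           PySem.List.pyGetD (PySem.List.pyGetD
             ((List.range m).map (fun i : Nat => (List.range m).map (fun j : Nat => G i j))) i []) j 0)) s)
      (∅ : Std.HashSet (Int × Int))
    = ((List.range m).flatMap (fun i =>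
        (List.range m).map (fun j => (F i j, G i j)))).foldl (fun s p => s.insert p)
        (∅ : Std.HashSet (Int × Int)) := by
  rw [PySem.List.pyRange_zero_natCast m, List.foldl_flatMap]
  simp only [List.foldl_map, PySem.List.pyGetD_natCast]
  apply PySem.List.foldl_congr_mem
  intro s i hi
  apply PySem.List.foldl_congr_mem
  intro s' j hj
  rw [PySem.List.getD_map_range (h := List.mem_range.mp hi),
      PySem.List.getD_map_range (h := List.mem_range.mp hi),
      PySem.List.getD_map_range (h := List.mem_range.mp hj),
      PySem.List.getD_map_range (h := List.mem_range.mp hj)]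

-- folding inserts into a hash set counts the distinct elements of the list
theorem pv_hash_aux {α : Type} [BEq α] [Hashable α] [LawfulBEq α] [DecidableEq α] (L : List α) :
    ∀ (s : Std.HashSet α) (F : Finset α),
      (∀ x, x ∈ s ↔ x ∈ F) → s.size = F.card →
      (L.foldl (fun s x => s.insert x) s).size = (F ∪ L.toFinset).card := by
  induction L with
  | nil => intro s F hmem hsize; simpa using hsize
  | cons a L ih =>
    intro s F hmem hsize
    simp only [List.foldl_cons]
    have h1 : ∀ x, x ∈ s.insert a ↔ x ∈ insert a F := by
      intro x
      rw [Std.HashSet.mem_insert, Finset.mem_insert, hmem x, beq_iff_eq, eq_comm]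
    have h2 : (s.insert a).size = (insert a F).card := by
      by_cases ha : a ∈ F
      · rw [Finset.card_insert_of_mem ha]
        simp [Std.HashSet.size_insert, (hmem a).mpr ha, hsize]
      · rw [Finset.card_insert_of_notMem ha]
        have : ¬ a ∈ s := fun h => ha ((hmem a).mp h)
        simp [Std.HashSet.size_insert, this, hsize]
    rw [ih (s.insert a) (insert a F) h1 h2]
    congr 1
    ext x
    simp [Finset.mem_insert]

theorem pv_hash_size {α : Type} [BEq α] [Hashable α] [LawfulBEq α] [DecidableEq α] (L : List α) :
    (L.foldl (fun s x => s.insert x) (∅ : Std.HashSet α)).size = L.toFinset.card := by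
  have := pv_hash_aux L ∅ ∅ (by simp) (by simp)
  simpa using this

-- a list with a duplicate has strictly fewer distinct elements than entries
theorem pv_card_lt {α : Type} [DecidableEq α] (L : List α) (h : ¬ L.Nodup) :
    L.toFinset.card < L.length := by
  rw [List.card_toFinset]
  rcases lt_or_eq_of_le (List.dedup_sublist L).length_le with hlt | heq
  · exact hlt
  · exact absurd (((List.dedup_sublist L).eq_of_length heq) ▸ (L.nodup_dedup)) h

-- pvL as a map over the product of index ranges
theorem pvL_eq (m : Nat) :
    pvL m = ((List.range m) ×ˢ (List.range m)).map (fun q => pvP m q.1 q.2) := by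
  simp [pvL, SProd.sprod, List.product, List.map_flatMap, List.map_map, Function.comp_def]

theorem pvL_length (m : Nat) : (pvL m).length = m * m := by
  rw [pvL_eq]; simp [List.length_product]

-- if m is odd, m ∣ 2d and |d| < m force d = 0
theorem pv_odd_cancel (m : Nat) (hodd : m % 2 = 1) (d : Int)
    (hdvd : (m : Int) ∣ 2 * d) (hb : -(m : Int) < d ∧ d < m) : d = 0 := by
  obtain ⟨c, hc⟩ := hdvd
  have hev : Even ((m : Int) * c) := ⟨d, by linarith⟩
  rcases Int.even_mul.mp hev with hEm | hEc
  · obtain ⟨r, hr⟩ := hEm; omega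
  · obtain ⟨c', rfl⟩ := hEc
    have he : (m : Int) * (c' + c') = 2 * ((m : Int) * c') := by ring
    rw [he] at hc
    have hd : d = (m : Int) * c' := by linarith
    rcases lt_trichotomy c' 0 with hc' | rfl | hc'
    · have h1 : (m : Int) * c' ≤ (m : Int) * (-1) :=
        mul_le_mul_of_nonneg_left (by omega) (by positivity)
      have h2 : (m : Int) * (-1) = -(m : Int) := by ring
      linarith
    · simpa using hd
    · have h1 : (m : Int) * 1 ≤ (m : Int) * c' :=
        mul_le_mul_of_nonneg_left (by omega) (by positivity)
      have h2 : (m : Int) * 1 = (m : Int) := by ring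
      linarith

-- for odd m the pair map is injective on the index product
theorem pv_inj (m : Nat) (hodd : m % 2 = 1) :
    ∀ q ∈ (List.range m) ×ˢ (List.range m), ∀ q' ∈ (List.range m) ×ˢ (List.range m),
      pvP m q.1 q.2 = pvP m q'.1 q'.2 → q = q' := by
  rintro ⟨i, j⟩ hq ⟨i', j'⟩ hq' heq
  obtain ⟨hi, hj⟩ := List.pair_mem_product.mp hq
  obtain ⟨hi', hj'⟩ := List.pair_mem_product.mp hq'
  rw [List.mem_range] at hi hj hi' hj'
  simp only [pvP, Prod.mk.injEq] at heq
  have h1 : ((i : Int) + j) % m = ((i' : Int) + j') % m := by omega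
  have h2 : ((i : Int) - j + m) % m = ((i' : Int) - j' + m) % m := by omega
  have d1 : (m : Int) ∣ ((i : Int) + j) - ((i' : Int) + j') :=
    Int.dvd_of_emod_eq_zero (Int.emod_eq_emod_iff_emod_sub_eq_zero.mp h1)
  have d2 : (m : Int) ∣ (((i : Int) - j + m) - ((i' : Int) - j' + m)) :=
    Int.dvd_of_emod_eq_zero (Int.emod_eq_emod_iff_emod_sub_eq_zero.mp h2)
  have dI : (m : Int) ∣ 2 * ((i : Int) - i') := by
    have hsum := dvd_add d1 d2
    have he : ((i : Int) + j) - ((i' : Int) + j') + (((i : Int) - j + m) - ((i' : Int) - j' + m))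
        = 2 * ((i : Int) - i') := by ring
    rwa [he] at hsum
  have dJ : (m : Int) ∣ 2 * ((j : Int) - j') := by
    have hsub := dvd_sub d1 d2
    have he : ((i : Int) + j) - ((i' : Int) + j') - (((i : Int) - j + m) - ((i' : Int) - j' + m))
        = 2 * ((j : Int) - j') := by ring
    rwa [he] at hsub
  have hI := pv_odd_cancel m hodd _ dI (by omega)
  have hJ := pv_odd_cancel m hodd _ dJ (by omega)
  simp only [Prod.mk.injEq]
  omega

-- for odd m every pair is distinct
theorem pv_nodup (m : Nat) (hodd : m % 2 = 1) : (pvL m).Nodup := by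
  rw [pvL_eq]
  exact ((List.nodup_range (n := m)).product (List.nodup_range (n := m))).map_on (pv_inj m hodd)

-- for even positive m positions (0,0) and (m/2, m/2) collide
theorem pv_not_nodup (m : Nat) (hm : 0 < m) (heven : m % 2 = 0) : ¬ (pvL m).Nodup := by
  intro hnd
  rw [pvL_eq] at hnd
  set t := m / 2 with ht
  have h2t : 2 * t = m := by omega
  have ht0 : 0 < t := by omega
  have h00 : ((0, 0) : Nat × Nat) ∈ (List.range m) ×ˢ (List.range m) :=
    List.pair_mem_product.mpr ⟨List.mem_range.mpr hm, List.mem_range.mpr hm⟩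
  have htt : ((t, t) : Nat × Nat) ∈ (List.range m) ×ˢ (List.range m) :=
    List.pair_mem_product.mpr ⟨List.mem_range.mpr (by omega), List.mem_range.mpr (by omega)⟩
  have hval : pvP m 0 0 = pvP m t t := by
    simp only [pvP]
    have htm : (t : Int) + t = m := by omega
    rw [show ((0:Nat) : Int) + ((0:Nat) : Int) = 0 by norm_num,
        show ((0:Nat) : Int) - ((0:Nat) : Int) + (m : Int) = m by ring, htm,
        show (t : Int) - t + m = m by ring]
    simp
  have := List.inj_on_of_nodup_map hnd h00 htt hval
  simp only [Prod.mk.injEq] at this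
  omega

-- the whole of A, for positive n = m
theorem pv_main (m : Nat) (hm : 0 < m) :
    find_matrices (m : Int) = decide (m % 2 = 1) := by
  have hpos : (0 : Int) < m := by exact_mod_cast hm
  simp only [find_matrices]
  rw [pv_matrix m (fun i j => PySem.Int.mod (i + j) (m : Int) + 1),
      pv_matrix m (fun i j => PySem.Int.mod (i - j + (m : Int)) (m : Int) + 1),
      pv_pairs m (fun i j => PySem.Int.mod ((i : Int) + j) (m : Int) + 1)
        (fun i j => PySem.Int.mod ((i : Int) - j + (m : Int)) (m : Int) + 1)]
  have hL : ((List.range m).flatMap (fun i : Nat => (List.range m).map (fun j : Nat =>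
      (PySem.Int.mod ((i : Int) + (j : Int)) (m : Int) + 1,
       PySem.Int.mod ((i : Int) - (j : Int) + (m : Int)) (m : Int) + 1)))) = pvL m := by
    simp [pvL, pvP, PySem.Int.mod_eq_emod_of_pos hpos]
  rw [hL, pv_hash_size (pvL m)]
  rcases Nat.even_or_odd m with he | ho
  · have he' : m % 2 = 0 := Nat.even_iff.mp he
    have hlt : (pvL m).toFinset.card < m * m := by
      have := pv_card_lt (pvL m) (pv_not_nodup m hm he')
      rwa [pvL_length] at this
    have hne : (((pvL m).toFinset.card : Int)) ≠ (m : Int) ^ 2 := by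
      have : ((m : Int)) ^ 2 = ((m * m : Nat) : Int) := by push_cast; ring
      rw [this]; exact_mod_cast Nat.ne_of_lt hlt
    rw [beq_eq_false_iff_ne.mpr hne, he']
    simp
  · have ho' : m % 2 = 1 := Nat.odd_iff.mp ho
    have hcard : (pvL m).toFinset.card = m * m := by
      rw [List.toFinset_card_of_nodup (pv_nodup m ho'), pvL_length]
    have heq : (((pvL m).toFinset.card : Int)) = (m : Int) ^ 2 := by
      rw [hcard]; push_cast; ring
    rw [show ((((pvL m).toFinset.card : Int)) == (m : Int) ^ 2) = true from beq_iff_eq.mpr heq, ho']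
    simp

theorem find_matrices_spec : Claim_equal_find_matrices := by
  unfold Claim_equal_find_matrices
  intro n _
  show find_matrices n = find_matrices_alt n
  rcases lt_trichotomy n 0 with hneg | rfl | hpos
  · have hr : PySem.List.pyRange 0 n 1 = [] := PySem.List.pyRange_one_eq_nil (le_of_lt hneg)
    have hn0 : n ≠ 0 := by omega
    have hp : (0 : Int) < n ^ 2 := by positivity
    simp only [find_matrices, find_matrices_alt, hr]
    simp only [List.map_nil, List.foldl_nil]
    have e1 : ((((∅ : Std.HashSet (Int × Int)).size : Int)) == n ^ 2) = false := by
      rw [Std.HashSet.size_empty]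
      exact beq_eq_false_iff_ne.mpr (by exact_mod_cast ne_of_lt hp)
    have e2 : (n == 0) = false := beq_eq_false_iff_ne.mpr hn0
    have e3 : decide (n > 0) = false := decide_eq_false (by omega)
    rw [e1, e2, e3]
    simp
  · simp [find_matrices, find_matrices_alt, PySem.List.pyRange_one_eq_nil (le_refl (0 : Int))]
  · obtain ⟨m, rfl⟩ := Int.eq_ofNat_of_zero_le (le_of_lt hpos)
    have hm : 0 < m := by exact_mod_cast hpos
    rw [pv_main m hm]
    have hmod : PySem.Int.mod (m : Int) 2 = (m : Int) % 2 :=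
      PySem.Int.mod_eq_emod_of_pos (by norm_num)
    simp only [find_matrices_alt, hmod]
    have h0 : ((m : Int) == 0) = false := by simp; omega
    have hgt : decide ((m : Int) > 0) = true := by simp; omega
    rw [h0, hgt]
    simp only [Bool.false_or, Bool.true_and]
    exact decide_eq_decide.mpr (by omega)
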